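-- pv_equiv track=rewrite | github.com/ArunaBijjam/haritha | prog21.py | sumofAP
-- ===== SOURCE A (Python) =====
-- def sumofAP(n,a,d):
-- 	sum=0
-- 	k=0
-- 	while k<n:
-- 		sum=sum+a
-- 		a=a+d
-- 		k=k+1
-- 	return sum
-- ===== SOURCE B (Python) =====
-- def sumofAP(n, a, d):
--     if n <= 0:
--         return 0
--     return n * a + d * (n * (n - 1) // 2)
-- ===== Notes on version B (the rewrite author's own statement) =====
-- stated objective: faster
-- what changed: Replaced the O(n) accumulation loop by the closed-form AP sum n*a + d*n*(n-1)//2 (0 for n <= 0).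
import Mathlib
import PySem

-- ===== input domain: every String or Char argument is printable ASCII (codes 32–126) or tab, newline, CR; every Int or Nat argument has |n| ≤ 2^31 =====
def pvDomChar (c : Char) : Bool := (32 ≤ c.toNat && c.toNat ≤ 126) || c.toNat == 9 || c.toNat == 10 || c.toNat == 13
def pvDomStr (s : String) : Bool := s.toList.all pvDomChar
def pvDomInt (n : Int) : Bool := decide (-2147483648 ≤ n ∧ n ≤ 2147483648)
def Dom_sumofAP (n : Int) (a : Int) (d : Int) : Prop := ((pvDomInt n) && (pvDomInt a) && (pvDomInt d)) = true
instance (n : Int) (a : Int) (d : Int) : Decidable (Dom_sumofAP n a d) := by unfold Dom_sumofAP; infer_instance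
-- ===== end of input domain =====

-- B replaces A's O(n) accumulation loop by the closed-form AP sum (objective: faster, asymptotic).

-- ===== PORT A =====
-- the 'while k < n' loop runs max(n,0) = n.toNat iterations, carrying (sum, a)
def sumofAPLoop : Nat → Int → Int → Int → Int
  | 0, _, _, s => s
  | m + 1, a, d, s => sumofAPLoop m (a + d) d (s + a)

def sumofAP (n : Int) (a : Int) (d : Int) : Int := sumofAPLoop n.toNat a d 0

-- ===== PORT B =====
def sumofAP_alt (n : Int) (a : Int) (d : Int) : Int :=
  if n ≤ 0 then 0 else n * a + d * PySem.Int.floordiv (n * (n - 1)) 2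

-- ===== PRECONDITION & SPEC =====
def Spec_sumofAP (n : Int) (a : Int) (d : Int) (out : Int) : Prop := out = sumofAP_alt n a d
instance (n : Int) (a : Int) (d : Int) (out : Int) : Decidable (Spec_sumofAP n a d out) := by unfold Spec_sumofAP; infer_instance

-- ===== CLAIM (what is proved, stated in full; the proofs are below) =====
def Claim_equal_sumofAP : Prop := ∀ (n : Int) (a : Int) (d : Int), Dom_sumofAP n a d → Spec_sumofAP n a d (sumofAP n a d)

-- ===== LEMMAS AND PROOFS =====
theorem sumofAPLoop_closed (m : Nat) : ∀ (a d s : Int),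
    sumofAPLoop m a d s = s + m * a + d * ((m * (m - 1) : Int) / 2) := by
  induction m with
  | zero => intro a d s; simp [sumofAPLoop]
  | succ k ih =>
    intro a d s
    rw [sumofAPLoop, ih]
    have hsplit : (((k : Int) + 1) * (((k : Int) + 1) - 1)) = (k : Int) * ((k : Int) - 1) + (k : Int) * 2 := by ring
    have h : (((k : Int) + 1) * (((k : Int) + 1) - 1)) / 2
        = (k : Int) * ((k : Int) - 1) / 2 + (k : Int) := by
      rw [hsplit, Int.add_mul_ediv_right _ _ (by norm_num : (2 : Int) ≠ 0)]
    push_cast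
    rw [h]
    ring

-- ===== VERDICT (by name: the statement is the Claim_ definition above) =====
theorem sumofAP_spec : Claim_equal_sumofAP := by
  intro n a d _
  unfold Spec_sumofAP sumofAP sumofAP_alt
  rw [sumofAPLoop_closed]
  by_cases h : n ≤ 0
  · simp [h, Int.toNat_of_nonpos h]
  · rw [if_neg h]
    rw [PySem.Int.floordiv_eq_ediv_of_pos (by norm_num)]
    rw [Int.toNat_of_nonneg (by omega)]
    ring_nf
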